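-- pv_equiv track=rewrite | github.com/gprabaha/naturalistic_social_gaze_mech | compute_inter_agent_fixation_overlap_probability.py | _find_densest_window
-- ===== SOURCE A (Python) =====
-- def _find_densest_window(intervals, window_size, run_length):
--     """
--     Given a list of fixation intervals (each a tuple of (start, stop)),
--     find the start time t (0 <= t <= run_length - window_size) for which the
--     total fixation duration within [t, t+window_size] is maximal.
--     If no intervals are present, return 0.
--     """
--     if not intervals:
--         return 0
--     # Candidate window start times: all fixation starts and (fixation end - window_size + 1) values.
--     candidates = set()
--     for s, e in intervals:
--         candidates.add(s)
--         if e - window_size + 1 >= 0: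
--             candidates.add(max(0, e - window_size + 1))
--     candidates = sorted(candidates)
--
--     best_start = 0
--     best_density = 0
--     for t in candidates:
--         # Ensure window does not exceed run_length.
--         if t + window_size > run_length:
--             t = run_length - window_size
--         density = 0
--         # Sum overlapping duration for each fixation.
--         for s, e in intervals:
--             # Compute overlap of [s, e] with [t, t+window_size]
--             overlap = max(0, min(e, t + window_size - 1) - max(s, t) + 1)
--             density += overlap
--         if density > best_density:
--             best_density = density
--             best_start = t
--     return best_start
-- ===== SOURCE B (Python) =====
-- def _find_densest_window(intervals, window_size, run_length):
--     """
--     Same result as the quadratic version, but each candidate window is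
--     evaluated in O(log N) from prefix sums of the sorted fixation endpoints:
--     coverage(x) = total length of [s, e+1) clipped to (-inf, x), so the
--     fixation mass inside [t, t+window_size) is coverage(t+w) - coverage(t).
--     """
--     if not intervals:
--         return 0
--     candidates = set()
--     for s, e in intervals:
--         candidates.add(s)
--         if e - window_size + 1 >= 0:
--             candidates.add(max(0, e - window_size + 1))
--     candidates = sorted(candidates)
--
--     # degenerate fixations (s > e) never contribute overlap; drop them
--     starts = sorted(s for s, e in intervals if s <= e)
--     ends = sorted(e + 1 for s, e in intervals if s <= e)
--     n = len(starts)
--     ps = [0]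
--     acc = 0
--     for v in starts:
--         acc += v
--         ps.append(acc)
--     pe = [0]
--     acc = 0
--     for v in ends:
--         acc += v
--         pe.append(acc)
--
--     def _bisect_right(arr, x):
--         lo, hi = 0, len(arr)
--         while lo < hi:
--             mid = (lo + hi) // 2
--             if arr[mid] <= x:
--                 lo = mid + 1
--             else:
--                 hi = mid
--         return lo
--
--     def coverage(x):
--         i = _bisect_right(ends, x)
--         j = _bisect_right(starts, x)
--         return (pe[i] + x * (n - i)) - (ps[j] + x * (n - j))
--
--     best_start = 0
--     best_density = 0
--     for t in candidates:
--         if t + window_size > run_length: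
--             t = run_length - window_size
--         density = coverage(t + window_size) - coverage(t)
--         if density > best_density:
--             best_density = density
--             best_start = t
--     return best_start
-- ===== Notes on version B (the rewrite author's own statement) =====
-- stated objective: faster
-- what changed: B replaces A's inner O(N) scan over all intervals per candidate window start with prefix sums of the sorted fixation endpoints queried by binary search, evaluating each candidate's overlap in O(log N).
import Mathlib
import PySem

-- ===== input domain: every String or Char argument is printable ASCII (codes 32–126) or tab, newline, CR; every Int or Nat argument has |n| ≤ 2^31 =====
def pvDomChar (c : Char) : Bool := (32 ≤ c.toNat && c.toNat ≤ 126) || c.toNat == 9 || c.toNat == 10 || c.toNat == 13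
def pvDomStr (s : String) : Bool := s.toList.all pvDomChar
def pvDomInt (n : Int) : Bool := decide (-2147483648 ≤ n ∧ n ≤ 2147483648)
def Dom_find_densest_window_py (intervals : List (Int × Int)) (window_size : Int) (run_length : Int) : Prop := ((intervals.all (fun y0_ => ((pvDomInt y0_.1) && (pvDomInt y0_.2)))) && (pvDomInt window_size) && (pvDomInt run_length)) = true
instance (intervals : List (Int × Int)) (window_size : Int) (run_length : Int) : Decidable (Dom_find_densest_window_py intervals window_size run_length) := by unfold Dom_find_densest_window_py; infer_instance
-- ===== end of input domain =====

-- B replaces A's per-candidate scan over all intervals by prefix sums of the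
-- sorted fixation endpoints queried with binary search (asymptotically faster).

-- ===== PORT A =====
-- candidate window starts, built exactly as A's set loop; shared text of both pythons
def pvCandsOf (intervals : List (Int × Int)) (window_size : Int) : PySem.Set Int :=
  intervals.foldl (fun c se =>
    let c := PySem.Set.add c se.1
    if se.2 - window_size + 1 >= 0 then PySem.Set.add c (max 0 (se.2 - window_size + 1)) else c)
    PySem.Set.empty

def find_densest_window_py (intervals : List (Int × Int)) (window_size : Int) (run_length : Int) : Int :=
  if intervals = [] then 0 else
  let candidates := PySem.List.sorted (pvCandsOf intervals window_size) (fun x => x) false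
  let res := candidates.foldl (fun (acc : Int × Int) t0 =>
    let t := if t0 + window_size > run_length then run_length - window_size else t0
    let density := intervals.foldl
      (fun d se => d + max 0 (min se.2 (t + window_size - 1) - max se.1 t + 1)) 0
    if density > acc.2 then (t, density) else acc) (0, 0)
  res.1

-- ===== PORT B =====
-- Source B's prefix-sum list: ps = [0]; acc = 0; for v in arr: acc += v; ps.append(acc)
def pvPrefixSums (arr : List Int) : List Int :=
  (arr.foldl (fun (st : List Int × Int) v =>
    let acc := st.2 + v
    (st.1 ++ [acc], acc)) ([0], 0)).1

-- Source B's coverage(x); the hand-written _bisect_right is exactly bisect.bisect_right,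
-- ported as the PySem primitive; pe[i]/ps[j] indices are Nat and in range, getD is exact
def pvCoverage (starts ends ps pe : List Int) (n x : Int) : Int :=
  let i := PySem.List.bisectRight ends x
  let j := PySem.List.bisectRight starts x
  (pe.getD i 0 + x * (n - (i : Int))) - (ps.getD j 0 + x * (n - (j : Int)))

def find_densest_window_py_alt (intervals : List (Int × Int)) (window_size : Int) (run_length : Int) : Int :=
  if intervals = [] then 0 else
  let candidates := PySem.List.sorted (pvCandsOf intervals window_size) (fun x => x) false
  let kept := intervals.filter (fun se => se.1 <= se.2)
  let starts := PySem.List.sorted (kept.map (fun se => se.1)) (fun x => x) false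
  let ends := PySem.List.sorted (kept.map (fun se => se.2 + 1)) (fun x => x) false
  let n : Int := (starts.length : Int)
  let ps := pvPrefixSums starts
  let pe := pvPrefixSums ends
  let res := candidates.foldl (fun (acc : Int × Int) t0 =>
    let t := if t0 + window_size > run_length then run_length - window_size else t0
    let density := pvCoverage starts ends ps pe n (t + window_size)
                   - pvCoverage starts ends ps pe n t
    if density > acc.2 then (t, density) else acc) (0, 0)
  res.1

-- ===== PRECONDITION & SPEC =====
def Spec_find_densest_window_py (intervals : List (Int × Int)) (window_size : Int) (run_length : Int) (out : Int) : Prop := out = find_densest_window_py_alt intervals window_size run_length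
instance (intervals : List (Int × Int)) (window_size : Int) (run_length : Int) (out : Int) : Decidable (Spec_find_densest_window_py intervals window_size run_length out) := by unfold Spec_find_densest_window_py; infer_instance

-- ===== CLAIM (what is proved, stated in full; the proofs are below) =====
def Claim_equal_find_densest_window_py : Prop := ∀ (intervals : List (Int × Int)) (window_size : Int) (run_length : Int), Dom_find_densest_window_py intervals window_size run_length → Spec_find_densest_window_py intervals window_size run_length (find_densest_window_py intervals window_size run_length)

-- ===== LEMMAS AND PROOFS =====



-- generic list-sum facts specific to the shapes of the two folds
theorem pvSumMapSub (l : List (Int × Int)) (f g : (Int × Int) → Int) :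
    (l.map f).sum - (l.map g).sum = (l.map (fun a => f a - g a)).sum := by
  induction l with
  | nil => simp
  | cons a tl ih => simp only [List.map_cons, List.sum_cons]; omega

theorem pvSumNonpos (l : List (Int × Int)) (f : (Int × Int) → Int)
    (h : ∀ a ∈ l, f a ≤ 0) : (l.map f).sum ≤ 0 := by
  induction l with
  | nil => simp
  | cons a tl ih =>
    simp only [List.map_cons, List.sum_cons]
    have h1 := h a (List.mem_cons_self)
    have h2 : (tl.map f).sum ≤ 0 := ih (fun b hb => h b (List.mem_cons_of_mem _ hb))
    omega

theorem pvSumFilterOfZero (l : List (Int × Int)) (p : (Int × Int) → Bool) (f : (Int × Int) → Int)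
    (h : ∀ a ∈ l, p a = false → f a = 0) :
    ((l.filter p).map f).sum = (l.map f).sum := by
  induction l with
  | nil => simp
  | cons a tl ih =>
    have ih' := ih (fun b hb hpb => h b (List.mem_cons_of_mem _ hb) hpb)
    by_cases hp : p a
    · simp [hp, ih']
    · simp only [Bool.not_eq_true] at hp
      simp [hp, ih', h a List.mem_cons_self hp]

theorem pvFoldlFixed {α : Type} (l : List α) (f : Int × Int → α → Int × Int)
    (h : ∀ x, f (0, 0) x = (0, 0)) : l.foldl f (0, 0) = (0, 0) := by
  induction l with
  | nil => rfl
  | cons a tl ih => simp only [List.foldl_cons, h a]; exact ih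

-- partial sums of a list starting from an accumulator; names pvPrefixSums' fold
def pvSums (acc : Int) : List Int → List Int
  | [] => []
  | v :: tl => (acc + v) :: pvSums (acc + v) tl

theorem pvPrefixSums_eq (arr : List Int) :
    pvPrefixSums arr = 0 :: pvSums 0 arr := by
  suffices h : ∀ (arr : List Int) (ps : List Int) (acc : Int),
      (arr.foldl (fun (st : List Int × Int) v =>
        let a := st.2 + v
        (st.1 ++ [a], a)) (ps, acc)).1 = ps ++ pvSums acc arr by
    simpa [pvPrefixSums] using h arr [0] 0
  intro arr
  induction arr with
  | nil => intro ps acc; simp [pvSums]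
  | cons v tl ih => intro ps acc; simp [pvSums, ih (ps ++ [acc + v]) (acc + v)]

theorem pvSums_getD (arr : List Int) : ∀ (acc : Int) (r : Nat), r < arr.length →
    (pvSums acc arr).getD r 0 = acc + (arr.take (r + 1)).sum := by
  induction arr with
  | nil => intro acc r h; simp at h
  | cons v tl ih =>
    intro acc r h
    cases r with
    | zero => simp [pvSums]
    | succ r' =>
      have h' : r' < tl.length := by simpa using h
      simp only [pvSums, List.getD_cons_succ, ih (acc + v) r' h', List.take_succ_cons,
        List.sum_cons]
      ring

theorem pvPrefixSums_getD (arr : List Int) (r : Nat) (h : r ≤ arr.length) :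
    (pvPrefixSums arr).getD r 0 = (arr.take r).sum := by
  rw [pvPrefixSums_eq]
  cases r with
  | zero => simp
  | succ r' =>
    have h' : r' < arr.length := by omega
    rw [List.getD_cons_succ, pvSums_getD arr 0 r' h', zero_add]

theorem pvSumMapMinOfGt (arr : List Int) (x : Int) (h : ∀ v ∈ arr, x < v) :
    (arr.map (fun v => min x v)).sum = x * (arr.length : Int) := by
  induction arr with
  | nil => simp
  | cons v tl ih =>
    have hv : min x v = x := min_eq_left (le_of_lt (h v List.mem_cons_self))
    have ih' := ih (fun b hb => h b (List.mem_cons_of_mem _ hb))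
    simp only [List.map_cons, List.sum_cons, hv, ih', List.length_cons]
    push_cast
    ring

theorem pvSumMapMin (arr : List Int) (x : Int) : ∀ (r : Nat), r ≤ arr.length →
    (∀ (j : Nat) (hj : j < arr.length), j < r → arr[j] ≤ x) →
    (∀ (j : Nat) (hj : j < arr.length), r ≤ j → x < arr[j]) →
    (arr.map (fun v => min x v)).sum = (arr.take r).sum + x * ((arr.length : Int) - (r : Int)) := by
  induction arr with
  | nil =>
    intro r hr _ _
    have : r = 0 := by simpa using hr
    simp [this]
  | cons v tl ih =>
    intro r hr h2 h3
    cases r with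
    | zero =>
      have hgt : ∀ b ∈ (v :: tl), x < b := by
        intro b hb
        obtain ⟨j, hj, rfl⟩ := List.mem_iff_getElem.mp hb
        exact h3 j hj (Nat.zero_le j)
      rw [pvSumMapMinOfGt (v :: tl) x hgt]
      simp
    | succ r' =>
      have hv : v ≤ x := h2 0 (by simp) (by omega)
      have hr' : r' ≤ tl.length := by simpa using hr
      have h2' : ∀ (j : Nat) (hj : j < tl.length), j < r' → tl[j] ≤ x := by
        intro j hj hjr
        have := h2 (j + 1) (by simpa using Nat.succ_lt_succ hj) (by omega)
        simpa using this
      have h3' : ∀ (j : Nat) (hj : j < tl.length), r' ≤ j → x < tl[j] := by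
        intro j hj hjr
        have := h3 (j + 1) (by simpa using Nat.succ_lt_succ hj) (by omega)
        simpa using this
      have ih' := ih r' hr' h2' h3'
      simp only [List.map_cons, List.sum_cons, ih', List.take_succ_cons, List.length_cons,
        min_eq_right hv]
      push_cast
      ring

-- the bisect + prefix-sum query equals the clipped-endpoint sum
theorem pvQueryEq (arr : List Int) (x : Int) (hs : arr.Pairwise (fun a b => a ≤ b)) :
    (pvPrefixSums arr).getD (PySem.List.bisectRight arr x) 0
      + x * ((arr.length : Int) - (PySem.List.bisectRight arr x : Int))
      = (arr.map (fun v => min x v)).sum := by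
  obtain ⟨h1, h2, h3⟩ := PySem.List.bisectRight_spec arr x hs
  rw [pvPrefixSums_getD arr _ h1, pvSumMapMin arr x _ h1 h2 h3]

-- sum of a function over a sorted (id-key) copy of a list
theorem pvSumSorted (l : List Int) (f : Int → Int) :
    ((PySem.List.sorted l (fun x => x) false).map f).sum = (l.map f).sum := by
  exact List.Perm.sum_eq (List.Perm.map f (PySem.List.sorted_perm l (fun x => x) false))

-- per-interval identity: clipped-coverage difference = A's overlap (needs s ≤ e, 1 ≤ w)
theorem pvOverlapIdent (s e t w : Int) (hs : s ≤ e) (hw : 1 ≤ w) :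
    (min (t + w) (e + 1) - min (t + w) s) - (min t (e + 1) - min t s)
      = max 0 (min e (t + w - 1) - max s t + 1) := by
  omega

-- the coverage query over the sorted kept endpoints is the clipped-endpoint sum over kept
theorem pvCoverageEq (kept : List (Int × Int)) (x : Int) :
    pvCoverage (PySem.List.sorted (kept.map (fun se => se.1)) (fun x => x) false)
               (PySem.List.sorted (kept.map (fun se => se.2 + 1)) (fun x => x) false)
               (pvPrefixSums (PySem.List.sorted (kept.map (fun se => se.1)) (fun x => x) false))
               (pvPrefixSums (PySem.List.sorted (kept.map (fun se => se.2 + 1)) (fun x => x) false))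
               ((PySem.List.sorted (kept.map (fun se => se.1)) (fun x => x) false).length : Int) x
      = (kept.map (fun se => min x (se.2 + 1) - min x se.1)).sum := by
  have hSp : (PySem.List.sorted (kept.map (fun se => se.1)) (fun x => x) false).Pairwise
      (fun a b => a ≤ b) := PySem.List.sorted_pairwise _ _
  have hEp : (PySem.List.sorted (kept.map (fun se => se.2 + 1)) (fun x => x) false).Pairwise
      (fun a b => a ≤ b) := PySem.List.sorted_pairwise _ _
  have hlen : ((PySem.List.sorted (kept.map (fun se => se.1)) (fun x => x) false).length : Int)
      = ((PySem.List.sorted (kept.map (fun se => se.2 + 1)) (fun x => x) false).length : Int) := by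
    simp [PySem.List.length_sorted]
  simp only [pvCoverage]
  rw [hlen, pvQueryEq _ x hEp, ← hlen, pvQueryEq _ x hSp, pvSumSorted, pvSumSorted,
    List.map_map, List.map_map]
  rw [pvSumMapSub]
  simp [Function.comp]

-- ===== VERDICT-SUPPORT: density equalities =====
theorem pvOverlapZeroOfDegenerate (s e t w : Int) (h : ¬ s ≤ e) :
    max 0 (min e (t + w - 1) - max s t + 1) = 0 := by omega

theorem pvDensityEq (intervals : List (Int × Int)) (w t : Int) (hw : 1 ≤ w) :
    (pvCoverage (PySem.List.sorted ((intervals.filter (fun se => se.1 <= se.2)).map (fun se => se.1)) (fun x => x) false)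
        (PySem.List.sorted ((intervals.filter (fun se => se.1 <= se.2)).map (fun se => se.2 + 1)) (fun x => x) false)
        (pvPrefixSums (PySem.List.sorted ((intervals.filter (fun se => se.1 <= se.2)).map (fun se => se.1)) (fun x => x) false))
        (pvPrefixSums (PySem.List.sorted ((intervals.filter (fun se => se.1 <= se.2)).map (fun se => se.2 + 1)) (fun x => x) false))
        ((PySem.List.sorted ((intervals.filter (fun se => se.1 <= se.2)).map (fun se => se.1)) (fun x => x) false).length : Int)
        (t + w)
      - pvCoverage (PySem.List.sorted ((intervals.filter (fun se => se.1 <= se.2)).map (fun se => se.1)) (fun x => x) false)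
        (PySem.List.sorted ((intervals.filter (fun se => se.1 <= se.2)).map (fun se => se.2 + 1)) (fun x => x) false)
        (pvPrefixSums (PySem.List.sorted ((intervals.filter (fun se => se.1 <= se.2)).map (fun se => se.1)) (fun x => x) false))
        (pvPrefixSums (PySem.List.sorted ((intervals.filter (fun se => se.1 <= se.2)).map (fun se => se.2 + 1)) (fun x => x) false))
        ((PySem.List.sorted ((intervals.filter (fun se => se.1 <= se.2)).map (fun se => se.1)) (fun x => x) false).length : Int)
        t)
      = intervals.foldl (fun d se => d + max 0 (min se.2 (t + w - 1) - max se.1 t + 1)) 0 := by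
  rw [pvCoverageEq, pvCoverageEq, pvSumMapSub, PySem.List.foldl_add, zero_add]
  rw [← pvSumFilterOfZero intervals (fun se => se.1 <= se.2)
      (fun se => max 0 (min se.2 (t + w - 1) - max se.1 t + 1))
      (fun a _ ha => pvOverlapZeroOfDegenerate a.1 a.2 t w (by simpa using ha))]
  apply congrArg
  apply List.map_congr_left
  intro a ha
  have hse : a.1 ≤ a.2 := by
    have := List.of_mem_filter ha
    simpa using this
  exact pvOverlapIdent a.1 a.2 t w hse hw

-- ===== VERDICT (by name: the statement is the Claim_ definition above) =====
theorem find_densest_window_py_spec : Claim_equal_find_densest_window_py := by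
  intro intervals window_size run_length _
  unfold Spec_find_densest_window_py
  by_cases hnil : intervals = []
  · simp [find_densest_window_py, find_densest_window_py_alt, hnil]
  · simp only [find_densest_window_py, find_densest_window_py_alt, if_neg hnil]
    congr 1
    by_cases hw : 1 ≤ window_size
    · apply PySem.List.foldl_congr_mem
      intro acc t0 _
      rw [← pvDensityEq intervals window_size
        (if t0 + window_size > run_length then run_length - window_size else t0) hw]
    · have hwle : window_size ≤ 0 := by omega
      rw [pvFoldlFixed, pvFoldlFixed]
      · -- B's step keeps (0, 0): its density is a sum of nonpositive clipped differences
        intro t0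
        rw [pvCoverageEq, pvCoverageEq, pvSumMapSub]
        rw [if_neg]
        have hle := pvSumNonpos (intervals.filter (fun se => se.1 <= se.2))
          (fun a => (min ((if t0 + window_size > run_length then run_length - window_size else t0) + window_size) (a.2 + 1)
              - min ((if t0 + window_size > run_length then run_length - window_size else t0) + window_size) a.1)
            - (min (if t0 + window_size > run_length then run_length - window_size else t0) (a.2 + 1)
              - min (if t0 + window_size > run_length then run_length - window_size else t0) a.1))
          (fun a ha => by
            have hse : a.1 ≤ a.2 := by simpa using List.of_mem_filter ha
            dsimp only
            omega)
        simp only [gt_iff_lt, not_lt]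
        exact le_trans hle (by norm_num)
      · -- A's step keeps (0, 0): every overlap term is 0 when window_size ≤ 0
        intro t0
        rw [PySem.List.foldl_add, zero_add, if_neg]
        have hle := pvSumNonpos intervals
          (fun se => max 0 (min se.2 ((if t0 + window_size > run_length then run_length - window_size else t0) + window_size - 1)
            - max se.1 (if t0 + window_size > run_length then run_length - window_size else t0) + 1))
          (fun a _ => by dsimp only; omega)
        simp only [gt_iff_lt, not_lt]
        exact le_trans hle (by norm_num)
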